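-- pv_equiv track=rewrite | github.com/jjoshua2/arc_agi | dupes/multi_group-024/train_only/898.py | transform
-- ===== SOURCE A (Python) =====
-- def get_neighbors(r, c, rows, cols):
--     dirs = [(-1, 0), (1, 0), (0, -1), (0, 1)]
--     ns = []
--     for dr, dc in dirs:
--         nr, nc = r + dr, c + dc
--         if 0 <= nr < rows and 0 <= nc < cols:
--             ns.append((nr, nc))
--     return ns
--
-- def transform(grid_lst):
--     if not grid_lst or not grid_lst[0]:
--         return []
--     rows = len(grid_lst)
--     cols = len(grid_lst[0])
--     grid = [row[:] for row in grid_lst]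
--     # Find all targets: 0's adjacent to 2's
--     targets = set()
--     for r in range(rows):
--         for c in range(cols):
--             if grid[r][c] == 2:
--                 for nr, nc in get_neighbors(r, c, rows, cols):
--                     if grid[nr][nc] == 0:
--                         targets.add((nr, nc))
--     # Find all blues
--     blues = [(r, c) for r in range(rows) for c in range(cols) if grid[r][c] == 1]
--     # For each blue, move to closest target in row or col
--     for br, bc in blues:
--         candidates = []
--         # Same row targets
--         for tr, tc in targets:
--             if tr == br and tc != bc:
--                 dist = abs(tc - bc)
--                 candidates.append((dist, tr, tc))
--         # Same col targets
--         for tr, tc in targets: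
--             if tc == bc and tr != br:
--                 dist = abs(tr - br)
--                 candidates.append((dist, tr, tc))
--         if not candidates:
--             continue
--         # Sort to get min dist, then smallest tr, then smallest tc
--         candidates.sort()
--         min_dist, tr, tc = candidates[0]
--         # Move
--         grid[tr][tc] = 1
--         grid[br][bc] = 0
--     return grid
-- ===== SOURCE B (Python) =====
-- def transform(grid_lst):
--     if not grid_lst or not grid_lst[0]:
--         return []
--     rows, cols = len(grid_lst), len(grid_lst[0])
--     grid = [row[:] for row in grid_lst]
--     # targets found from the 0 side: a 0-cell with some in-bounds neighbor equal to 2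
--     targets = []
--     for r in range(rows):
--         for c in range(cols):
--             if grid[r][c] == 0 and any(
--                 0 <= nr < rows and 0 <= nc < cols and grid[nr][nc] == 2
--                 for nr, nc in ((r - 1, c), (r + 1, c), (r, c - 1), (r, c + 1))
--             ):
--                 targets.append((r, c))
--     blues = [(r, c) for r in range(rows) for c in range(cols) if grid[r][c] == 1]
--     for br, bc in blues:
--         # single pass keeping the lexicographic minimum candidate (no list, no sort)
--         best = None
--         for tr, tc in targets:
--             if tr == br and tc != bc:
--                 cand = (abs(tc - bc), tr, tc)
--             elif tc == bc and tr != br: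
--                 cand = (abs(tr - br), tr, tc)
--             else:
--                 continue
--             if best is None or cand < best:
--                 best = cand
--         if best is None:
--             continue
--         _, tr, tc = best
--         grid[tr][tc] = 1
--         grid[br][bc] = 0
--     return grid
-- ===== Notes on version B (the rewrite author's own statement) =====
-- stated objective: alternative
-- what changed: Targets are detected from the 0-cell side (scan 0s and test the four neighbors for a 2, giving a duplicate-free row-major list instead of a set grown from each 2's neighborhood), and each blue picks its destination in one pass that keeps the running lexicographic-minimum candidate instead of building two candidate lists, sorting them and taking the first element.
import Mathlib
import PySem

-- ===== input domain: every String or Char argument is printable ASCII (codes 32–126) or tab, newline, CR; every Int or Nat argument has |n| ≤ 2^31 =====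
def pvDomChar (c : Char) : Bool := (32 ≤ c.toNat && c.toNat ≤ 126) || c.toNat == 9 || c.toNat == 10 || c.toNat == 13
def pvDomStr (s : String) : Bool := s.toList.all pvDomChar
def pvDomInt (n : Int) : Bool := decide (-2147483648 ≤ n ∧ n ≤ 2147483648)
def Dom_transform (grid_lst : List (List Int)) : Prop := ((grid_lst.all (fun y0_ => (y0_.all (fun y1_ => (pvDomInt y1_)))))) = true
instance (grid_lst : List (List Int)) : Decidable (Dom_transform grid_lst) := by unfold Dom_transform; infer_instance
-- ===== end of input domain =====

-- B detects targets from the 0-cell side (one duplicate-free row-major scan instead of a set grown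
-- from each 2's neighborhood) and selects each blue's destination by a single running-minimum pass
-- instead of building two candidate lists, sorting them and taking the head (objective: alternative).
-- Python A mutates only its private copy of the grid; equivalence is about the return value.

-- ===== PORT A =====
-- grid[r][c] (both ports read cells through this accessor; defaults unreachable under Pre_)
def pvAt (g : List (List Int)) (r c : Int) : Int :=
  PySem.List.pyGetD (PySem.List.pyGetD g r []) c 0

-- get_neighbors(r, c, rows, cols)
def pyNeighbors (r c rows cols : Int) : List (Int × Int) :=
  ([(-1, 0), (1, 0), (0, -1), (0, 1)] : List (Int × Int)).foldl (fun ns d =>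
    if decide (0 ≤ r + d.1) && decide (r + d.1 < rows) && decide (0 ≤ c + d.2) && decide (c + d.2 < cols)
    then ns ++ [(r + d.1, c + d.2)] else ns) []

-- Python tuple '<' on (dist, tr, tc)
def pvLexLt (a b : Int × Int × Int) : Bool :=
  decide (a.1 < b.1 ∨ (a.1 = b.1 ∧ (a.2.1 < b.2.1 ∨ (a.2.1 = b.2.1 ∧ a.2.2 < b.2.2))))

-- candidates.sort(): insertion sort under the tuple order (ties are equal triples)
def pvInsertLex (x : Int × Int × Int) : List (Int × Int × Int) → List (Int × Int × Int)
  | [] => [x]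
  | y :: ys => if pvLexLt x y then x :: y :: ys else y :: pvInsertLex x ys

def pvSortLex : List (Int × Int × Int) → List (Int × Int × Int)
  | [] => []
  | x :: xs => pvInsertLex x (pvSortLex xs)

-- the targets set: 0's adjacent to 2's, collected around each 2
def pvTargetsA (g : List (List Int)) (rows cols : Int) : PySem.Set (Int × Int) :=
  (PySem.List.pyRange 0 rows).foldl (fun ts r =>
    (PySem.List.pyRange 0 cols).foldl (fun ts c =>
      if pvAt g r c == 2 then
        (pyNeighbors r c rows cols).foldl (fun ts n =>
          if pvAt g n.1 n.2 == 0 then PySem.Set.add ts n else ts) ts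
      else ts) ts) PySem.Set.empty

-- blues, row-major (shared literally by both Pythons)
def pvBlues (g : List (List Int)) (rows cols : Int) : List (Int × Int) :=
  (PySem.List.pyRange 0 rows).flatMap (fun r =>
    (PySem.List.pyRange 0 cols).filterMap (fun c =>
      if pvAt g r c == 1 then some (r, c) else none))

-- grid[tr][tc] = 1; grid[br][bc] = 0 (identical statements in both Pythons)
def pvMove (g : List (List Int)) (tr tc br bc : Int) : List (List Int) :=
  let g1 := PySem.List.pySetD g tr (PySem.List.pySetD (PySem.List.pyGetD g tr []) tc 1)
  PySem.List.pySetD g1 br (PySem.List.pySetD (PySem.List.pyGetD g1 br []) bc 0)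

-- A's candidate list: the same-row scan followed by the same-column scan
def pvCandsA (targets : List (Int × Int)) (br bc : Int) : List (Int × Int × Int) :=
  targets.foldl (fun cs t =>
      if t.2 == bc && t.1 != br then cs ++ [(((t.1 - br).natAbs : Int), t.1, t.2)] else cs)
    (targets.foldl (fun cs t =>
      if t.1 == br && t.2 != bc then cs ++ [(((t.2 - bc).natAbs : Int), t.1, t.2)] else cs) [])

-- A's loop body: two candidate scans, sort, take candidates[0]
def pvStepA (targets : PySem.Set (Int × Int)) (g : List (List Int)) (b : Int × Int) : List (List Int) :=
  if pvCandsA targets b.1 b.2 = [] then g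
  else
    let m := (pvSortLex (pvCandsA targets b.1 b.2)).headD (0, 0, 0)
    pvMove g m.2.1 m.2.2 b.1 b.2

def transform (grid_lst : List (List Int)) : List (List Int) :=
  if grid_lst = [] ∨ grid_lst.headD [] = [] then []
  else
    let rows : Int := grid_lst.length
    let cols : Int := (grid_lst.headD []).length
    (pvBlues grid_lst rows cols).foldl (pvStepA (pvTargetsA grid_lst rows cols)) grid_lst

-- ===== PORT B =====
-- the four axis neighbors of (r, c), unbounded
def pvAround (r c : Int) : List (Int × Int) := [(r - 1, c), (r + 1, c), (r, c - 1), (r, c + 1)]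

-- B's targets: row-major scan of the 0-cells that see a 2 in an in-bounds neighbor
def pvTargetsB (g : List (List Int)) (rows cols : Int) : List (Int × Int) :=
  (PySem.List.pyRange 0 rows).flatMap (fun r =>
    (PySem.List.pyRange 0 cols).filterMap (fun c =>
      if pvAt g r c == 0 &&
         (pvAround r c).any (fun n =>
           decide (0 ≤ n.1) && decide (n.1 < rows) && decide (0 ≤ n.2) && decide (n.2 < cols) &&
           (pvAt g n.1 n.2 == 2))
      then some (r, c) else none))

-- the if/elif candidate of one target for the blue at (br, bc)
def pvCand (br bc : Int) (t : Int × Int) : Option (Int × Int × Int) :=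
  if t.1 == br && t.2 != bc then some (((t.2 - bc).natAbs : Int), t.1, t.2)
  else if t.2 == bc && t.1 != br then some (((t.1 - br).natAbs : Int), t.1, t.2)
  else none

-- B's running minimum over the single pass
def pvBest (targets : List (Int × Int)) (br bc : Int) : Option (Int × Int × Int) :=
  targets.foldl (fun best t =>
    match pvCand br bc t with
    | none => best
    | some c =>
      match best with
      | none => some c
      | some m => if pvLexLt c m then some c else some m) none

-- B's loop body: one pass keeping the running lexicographic minimum
def pvStepB (targets : List (Int × Int)) (g : List (List Int)) (b : Int × Int) : List (List Int) :=
  match pvBest targets b.1 b.2 with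
  | none => g
  | some m => pvMove g m.2.1 m.2.2 b.1 b.2

def transform_alt (grid_lst : List (List Int)) : List (List Int) :=
  if grid_lst = [] ∨ grid_lst.headD [] = [] then []
  else
    let rows : Int := grid_lst.length
    let cols : Int := (grid_lst.headD []).length
    (pvBlues grid_lst rows cols).foldl (pvStepB (pvTargetsB grid_lst rows cols)) grid_lst

-- ===== PRECONDITION & SPEC =====
-- Pre_ excludes exactly the ragged grids with a row SHORTER than the first row: there Python A
-- raises IndexError (the target scan indexes every column of every row). No returning input is excluded.
def Pre_transform (grid_lst : List (List Int)) : Prop :=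
  ∀ row ∈ grid_lst, (grid_lst.headD []).length ≤ row.length
instance (grid_lst : List (List Int)) : Decidable (Pre_transform grid_lst) := by
  unfold Pre_transform; infer_instance

def pvWitness_transform : List (List Int) := [[2, 0, 1], [0, 0, 0]]

def Spec_transform (grid_lst : List (List Int)) (out : List (List Int)) : Prop := out = transform_alt grid_lst
instance (grid_lst : List (List Int)) (out : List (List Int)) : Decidable (Spec_transform grid_lst out) := by unfold Spec_transform; infer_instance

-- ===== CLAIM (what is proved, stated in full; the proofs are below) =====
def Claim_equal_transform : Prop := ∀ (grid_lst : List (List Int)), Dom_transform grid_lst → Pre_transform grid_lst → Spec_transform grid_lst (transform grid_lst)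

-- ===== LEMMAS AND PROOFS =====

-- basic order facts about pvLexLt
theorem pvLexLt_irrefl (a : Int × Int × Int) : pvLexLt a a = false := by
  obtain ⟨a1, a2, a3⟩ := a; simp [pvLexLt]

theorem pvLexLt_trans {a b c : Int × Int × Int} (h1 : pvLexLt a b = true) (h2 : pvLexLt b c = true) :
    pvLexLt a c = true := by
  obtain ⟨a1, a2, a3⟩ := a; obtain ⟨b1, b2, b3⟩ := b; obtain ⟨c1, c2, c3⟩ := c
  simp [pvLexLt] at *; omega

theorem pvLexLt_antisymm {a b : Int × Int × Int} (h1 : pvLexLt a b = false) (h2 : pvLexLt b a = false) :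
    a = b := by
  obtain ⟨a1, a2, a3⟩ := a; obtain ⟨b1, b2, b3⟩ := b
  simp only [pvLexLt, decide_eq_false_iff_not] at h1 h2
  simp only [Prod.mk.injEq]
  omega

theorem pvLexLt_neg_trans {a b c : Int × Int × Int} (h1 : pvLexLt b a = false) (h2 : pvLexLt c b = false) :
    pvLexLt c a = false := by
  obtain ⟨a1, a2, a3⟩ := a; obtain ⟨b1, b2, b3⟩ := b; obtain ⟨c1, c2, c3⟩ := c
  simp [pvLexLt] at *; omega

theorem mem_pvInsertLex {x y : Int × Int × Int} {l : List (Int × Int × Int)} :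
    y ∈ pvInsertLex x l ↔ y = x ∨ y ∈ l := by
  induction l with
  | nil => simp [pvInsertLex]
  | cons z zs ih =>
    simp only [pvInsertLex]
    split
    · simp
    · simp [ih]; tauto

theorem mem_pvSortLex {y : Int × Int × Int} {l : List (Int × Int × Int)} :
    y ∈ pvSortLex l ↔ y ∈ l := by
  induction l with
  | nil => simp [pvSortLex]
  | cons z zs ih => simp [pvSortLex, mem_pvInsertLex, ih]

theorem pairwise_pvInsertLex {x : Int × Int × Int} {l : List (Int × Int × Int)}
    (h : l.Pairwise (fun a b => pvLexLt b a = false)) :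
    (pvInsertLex x l).Pairwise (fun a b => pvLexLt b a = false) := by
  induction l with
  | nil => simp [pvInsertLex]
  | cons z zs ih =>
    rw [List.pairwise_cons] at h
    simp only [pvInsertLex]
    split
    · rename_i hlt
      refine List.Pairwise.cons ?_ (List.Pairwise.cons h.1 h.2)
      intro y hy
      rcases List.mem_cons.mp hy with rfl | hy
      · cases hzx : pvLexLt y x
        · rfl
        · exact absurd (pvLexLt_trans hzx hlt) (by simp [pvLexLt_irrefl])
      · cases hyx : pvLexLt y x
        · rfl
        · exact absurd (pvLexLt_trans hyx hlt) (by simp [h.1 y hy])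
    · rename_i hnlt
      refine List.Pairwise.cons ?_ (ih h.2)
      intro y hy
      rcases mem_pvInsertLex.mp hy with rfl | hy
      · simpa using hnlt
      · exact h.1 y hy

theorem pairwise_pvSortLex (l : List (Int × Int × Int)) :
    (pvSortLex l).Pairwise (fun a b => pvLexLt b a = false) := by
  induction l with
  | nil => simp [pvSortLex]
  | cons z zs ih => exact pairwise_pvInsertLex ih

theorem pvSortLex_ne_nil {l : List (Int × Int × Int)} (h : l ≠ []) : pvSortLex l ≠ [] := by
  cases l with
  | nil => exact absurd rfl h
  | cons x xs =>
    simp only [pvSortLex]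
    cases hs : pvSortLex xs with
    | nil => simp [pvInsertLex]
    | cons y ys => simp only [pvInsertLex]; split <;> simp

-- the head of the sorted candidate list is a member and lex-minimal
theorem pvSortLex_headD_spec {l : List (Int × Int × Int)} (h : l ≠ []) :
    (pvSortLex l).headD (0, 0, 0) ∈ l ∧ ∀ y ∈ l, pvLexLt y ((pvSortLex l).headD (0, 0, 0)) = false := by
  cases hs : pvSortLex l with
  | nil => exact absurd hs (pvSortLex_ne_nil h)
  | cons m t =>
    have hmem : m ∈ l := mem_pvSortLex.mp (hs ▸ List.mem_cons_self)
    have hpw := pairwise_pvSortLex l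
    rw [hs, List.pairwise_cons] at hpw
    refine ⟨by simpa using hmem, fun y hy => ?_⟩
    have hys : y ∈ pvSortLex l := mem_pvSortLex.mpr hy
    rw [hs] at hys
    rcases List.mem_cons.mp hys with rfl | hyt
    · simpa using pvLexLt_irrefl y
    · simpa using hpw.1 y hyt

-- generic membership through a monotone set-building fold
theorem mem_foldl_sets {β γ : Type} [BEq γ] [LawfulBEq γ] {f : PySem.Set γ → β → PySem.Set γ}
    {Q : β → γ → Prop} (hf : ∀ s b y, y ∈ f s b ↔ y ∈ s ∨ Q b y)
    (l : List β) (s : PySem.Set γ) (y : γ) :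
    y ∈ l.foldl f s ↔ y ∈ s ∨ ∃ b ∈ l, Q b y := by
  induction l generalizing s with
  | nil => simp
  | cons b bs ih => simp [List.foldl_cons, ih, hf]; tauto

theorem mem_foldl_add_if {γ : Type} [BEq γ] [LawfulBEq γ] {p : γ → Bool}
    (l : List γ) (s : PySem.Set γ) (y : γ) :
    y ∈ l.foldl (fun s x => if p x then PySem.Set.add s x else s) s ↔ y ∈ s ∨ (y ∈ l ∧ p y = true) := by
  have h := mem_foldl_sets (f := fun s x => if p x then PySem.Set.add s x else s)
    (Q := fun x y => y = x ∧ p x = true)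
    (fun s b y => by
      by_cases hp : p b = true
      · simp only [hp, if_true, PySem.Set.mem_add]; tauto
      · simp only [Bool.not_eq_true] at hp; simp [hp]) l s y
  rw [h]
  constructor
  · rintro (h | ⟨b, hb, rfl, hp⟩) <;> simp_all
  · rintro (h | ⟨hy, hp⟩)
    · exact Or.inl h
    · exact Or.inr ⟨y, hy, rfl, hp⟩

-- membership in get_neighbors
set_option maxHeartbeats 1000000 in
theorem mem_pyNeighbors {r c rows cols : Int} {t : Int × Int} :
    t ∈ pyNeighbors r c rows cols ↔
      (t = (r - 1, c) ∨ t = (r + 1, c) ∨ t = (r, c - 1) ∨ t = (r, c + 1)) ∧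
        0 ≤ t.1 ∧ t.1 < rows ∧ 0 ≤ t.2 ∧ t.2 < cols := by
  obtain ⟨t1, t2⟩ := t
  rw [pyNeighbors, PySem.List.foldl_append_if]
  simp only [List.nil_append, List.mem_map, List.mem_filter, List.mem_cons, List.not_mem_nil,
    or_false, Bool.and_eq_true, decide_eq_true_eq, Prod.mk.injEq, Prod.exists]
  constructor
  · rintro ⟨d1, d2, ⟨hd, hb⟩, rfl, rfl⟩
    rcases hd with ⟨rfl, rfl⟩ | ⟨rfl, rfl⟩ | ⟨rfl, rfl⟩ | ⟨rfl, rfl⟩ <;> omega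
  · rintro ⟨hd, hb⟩
    rcases hd with ⟨h1, h2⟩ | ⟨h1, h2⟩ | ⟨h1, h2⟩ | ⟨h1, h2⟩
    · exact ⟨-1, 0, ⟨Or.inl ⟨rfl, rfl⟩, by omega⟩, by omega, by omega⟩
    · exact ⟨1, 0, ⟨Or.inr (Or.inl ⟨rfl, rfl⟩), by omega⟩, by omega, by omega⟩
    · exact ⟨0, -1, ⟨Or.inr (Or.inr (Or.inl ⟨rfl, rfl⟩)), by omega⟩, by omega, by omega⟩
    · exact ⟨0, 1, ⟨Or.inr (Or.inr (Or.inr ⟨rfl, rfl⟩)), by omega⟩, by omega, by omega⟩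

-- A's target set and B's target list have the same members
theorem targets_mem_equiv (g : List (List Int)) (rows cols : Int) (y : Int × Int) :
    y ∈ pvTargetsA g rows cols ↔ y ∈ pvTargetsB g rows cols := by
  have hstep2 : ∀ (r : Int) (s : PySem.Set (Int × Int)) (c : Int) (y : Int × Int),
      y ∈ (if pvAt g r c == 2 then
            (pyNeighbors r c rows cols).foldl
              (fun ts n => if pvAt g n.1 n.2 == 0 then PySem.Set.add ts n else ts) s
          else s) ↔
        y ∈ s ∨ (pvAt g r c = 2 ∧ y ∈ pyNeighbors r c rows cols ∧ pvAt g y.1 y.2 = 0) := by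
    intro r s c y
    by_cases h2 : pvAt g r c = 2
    · rw [if_pos (by simp [h2])]
      rw [mem_foldl_add_if (p := fun n : Int × Int => pvAt g n.1 n.2 == 0)]
      simp [h2]
    · rw [if_neg (by simp [h2])]
      simp [h2]
  have hA : y ∈ pvTargetsA g rows cols ↔
      ∃ r ∈ PySem.List.pyRange 0 rows, ∃ c ∈ PySem.List.pyRange 0 cols,
        pvAt g r c = 2 ∧ y ∈ pyNeighbors r c rows cols ∧ pvAt g y.1 y.2 = 0 := by
    unfold pvTargetsA
    rw [mem_foldl_sets
      (Q := fun r y => ∃ c ∈ PySem.List.pyRange 0 cols,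
        pvAt g r c = 2 ∧ y ∈ pyNeighbors r c rows cols ∧ pvAt g y.1 y.2 = 0)
      (fun s r y => mem_foldl_sets (fun s c y => hstep2 r s c y) _ s y)]
    simp [PySem.Set.empty]
  rw [hA]
  unfold pvTargetsB
  simp only [List.mem_flatMap, List.mem_filterMap, Option.ite_none_right_eq_some,
    Option.some.injEq, Bool.and_eq_true, beq_iff_eq, List.any_eq_true, decide_eq_true_eq]
  obtain ⟨y1, y2⟩ := y
  constructor
  · rintro ⟨r, hr, c, hc, h2, hn, h0⟩
    rw [mem_pyNeighbors] at hn
    obtain ⟨hloc, hb1, hb2, hb3, hb4⟩ := hn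
    rw [PySem.List.mem_pyRange_one] at hr hc
    refine ⟨y1, by rw [PySem.List.mem_pyRange_one]; omega,
            y2, by rw [PySem.List.mem_pyRange_one]; omega,
            ⟨h0, (r, c), ?_, ⟨⟨⟨by omega, by omega⟩, by omega⟩, by omega⟩, h2⟩, rfl⟩
    simp only [pvAround, List.mem_cons, List.not_mem_nil, or_false, Prod.mk.injEq] at hloc ⊢
    omega
  · rintro ⟨r, hr, c, hc, ⟨h0, ⟨n1, n2⟩, hn, ⟨⟨⟨hb1, hb2⟩, hb3⟩, hb4⟩, h2⟩, heq⟩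
    injection heq with he1 he2
    subst he1
    subst he2
    rw [PySem.List.mem_pyRange_one] at hr hc
    refine ⟨n1, by rw [PySem.List.mem_pyRange_one]; omega,
            n2, by rw [PySem.List.mem_pyRange_one]; omega, h2, ?_, h0⟩
    rw [mem_pyNeighbors]
    simp only [pvAround, List.mem_cons, List.not_mem_nil, or_false, Prod.mk.injEq] at hn
    simp only [Prod.mk.injEq]
    omega

-- B's running minimum: none iff no candidate
theorem bestFold_none_iff (br bc : Int) (ts : List (Int × Int)) (acc : Option (Int × Int × Int)) :
    ts.foldl (fun best t =>
      match pvCand br bc t with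
      | none => best
      | some c => match best with
        | none => some c
        | some m => if pvLexLt c m then some c else some m) acc = none ↔
      acc = none ∧ ∀ t ∈ ts, pvCand br bc t = none := by
  induction ts generalizing acc with
  | nil => simp
  | cons t ts ih =>
    simp only [List.foldl_cons]
    cases hc : pvCand br bc t with
    | none =>
      rw [ih]
      constructor
      · rintro ⟨h1, h2⟩
        refine ⟨h1, fun u hu => ?_⟩
        rcases List.mem_cons.mp hu with rfl | hu
        · exact hc
        · exact h2 u hu
      · rintro ⟨h1, h2⟩
        exact ⟨h1, fun u hu => h2 u (List.mem_cons_of_mem _ hu)⟩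
    | some c =>
      have hne : ∀ (a : Int × Int × Int),
          ¬ (ts.foldl (fun best t =>
            match pvCand br bc t with
            | none => best
            | some c => match best with
              | none => some c
              | some m => if pvLexLt c m then some c else some m) (some a) = none) := by
        intro a h
        rw [ih] at h
        exact absurd h.1 (by simp)
      cases acc with
      | none =>
        refine iff_of_false (hne c) ?_
        rintro ⟨_, hall⟩
        exact absurd (hall t List.mem_cons_self) (by simp [hc])
      | some m =>
        refine iff_of_false ?_ (by rintro ⟨h, _⟩; cases h)
        have hred : (match some c with
            | none => some m
            | some c => match some m with
              | none => some c
              | some m => if pvLexLt c m then some c else some m) = (if pvLexLt c m then some c else some m) := rfl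
        rw [hred]
        cases hlt : pvLexLt c m
        · exact hne m
        · exact hne c

-- B's running minimum: a some result is a candidate and lex-minimal
theorem bestFold_some_spec (br bc : Int) (ts : List (Int × Int)) (acc : Option (Int × Int × Int))
    (m : Int × Int × Int)
    (h : ts.foldl (fun best t =>
      match pvCand br bc t with
      | none => best
      | some c => match best with
        | none => some c
        | some m => if pvLexLt c m then some c else some m) acc = some m) :
    (acc = some m ∨ ∃ t ∈ ts, pvCand br bc t = some m) ∧
      (∀ a, acc = some a → pvLexLt a m = false) ∧
      (∀ t ∈ ts, ∀ c, pvCand br bc t = some c → pvLexLt c m = false) := by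
  induction ts generalizing acc with
  | nil =>
    simp only [List.foldl_nil] at h
    subst h
    exact ⟨Or.inl rfl, fun a ha => by injection ha with ha; subst ha; exact pvLexLt_irrefl _, by simp⟩
  | cons t ts ih =>
    simp only [List.foldl_cons] at h
    cases hc : pvCand br bc t with
    | none =>
      rw [hc] at h
      obtain ⟨h1, h2, h3⟩ := ih _ h
      refine ⟨?_, h2, ?_⟩
      · rcases h1 with h1 | ⟨u, hu, hcu⟩
        · exact Or.inl h1
        · exact Or.inr ⟨u, List.mem_cons_of_mem _ hu, hcu⟩
      · intro u hu c' hcu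
        rcases List.mem_cons.mp hu with rfl | hu
        · rw [hc] at hcu; exact absurd hcu (by simp)
        · exact h3 u hu c' hcu
    | some c =>
      rw [hc] at h
      cases acc with
      | none =>
        obtain ⟨h1, h2, h3⟩ := ih _ h
        refine ⟨?_, by simp, ?_⟩
        · rcases h1 with h1 | ⟨u, hu, hcu⟩
          · exact Or.inr ⟨t, List.mem_cons_self, by rw [hc]; exact h1⟩
          · exact Or.inr ⟨u, List.mem_cons_of_mem _ hu, hcu⟩
        · intro u hu c' hcu
          rcases List.mem_cons.mp hu with rfl | hu
          · rw [hc] at hcu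
            injection hcu with hcu
            subst hcu
            exact h2 _ rfl
          · exact h3 u hu c' hcu
      | some a =>
        have hred : (ts.foldl (fun best t =>
            match pvCand br bc t with
            | none => best
            | some c => match best with
              | none => some c
              | some m => if pvLexLt c m then some c else some m)
            (if pvLexLt c a then some c else some a)) = some m := h
        by_cases hlt : pvLexLt c a = true
        · rw [if_pos hlt] at hred
          obtain ⟨h1, h2, h3⟩ := ih _ hred
          refine ⟨?_, ?_, ?_⟩
          · rcases h1 with h1 | ⟨u, hu, hcu⟩
            · exact Or.inr ⟨t, List.mem_cons_self, by rw [hc]; exact h1⟩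
            · exact Or.inr ⟨u, List.mem_cons_of_mem _ hu, hcu⟩
          · intro a' ha'
            injection ha' with ha'
            subst ha'
            have hcm : pvLexLt c m = false := h2 _ rfl
            cases ham : pvLexLt a m
            · rfl
            · exact absurd (pvLexLt_trans hlt ham) (by simp [hcm])
          · intro u hu c' hcu
            rcases List.mem_cons.mp hu with rfl | hu
            · rw [hc] at hcu; injection hcu with hcu; subst hcu; exact h2 _ rfl
            · exact h3 u hu c' hcu
        · rw [if_neg hlt] at hred
          replace hlt : pvLexLt c a = false := by
            cases hca : pvLexLt c a
            · rfl
            · exact absurd hca hlt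
          obtain ⟨h1, h2, h3⟩ := ih _ hred
          refine ⟨?_, h2, ?_⟩
          · rcases h1 with h1 | ⟨u, hu, hcu⟩
            · exact Or.inl h1
            · exact Or.inr ⟨u, List.mem_cons_of_mem _ hu, hcu⟩
          · intro u hu c' hcu
            rcases List.mem_cons.mp hu with rfl | hu
            · rw [hc] at hcu; injection hcu with hcu; subst hcu
              exact pvLexLt_neg_trans (h2 _ rfl) hlt
            · exact h3 u hu c' hcu

-- A's candidate list: membership = "some target yields this candidate"
theorem mem_candA {br bc : Int} (ts : List (Int × Int)) (x : Int × Int × Int) :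
    x ∈ (ts.foldl (fun cs t =>
          if t.2 == bc && t.1 != br then cs ++ [(((t.1 - br).natAbs : Int), t.1, t.2)] else cs)
        (ts.foldl (fun cs t =>
          if t.1 == br && t.2 != bc then cs ++ [(((t.2 - bc).natAbs : Int), t.1, t.2)] else cs) [])) ↔
      ∃ t ∈ ts, pvCand br bc t = some x := by
  rw [PySem.List.foldl_append_if, PySem.List.foldl_append_if]
  simp only [List.nil_append, List.mem_append, List.mem_map, List.mem_filter]
  constructor
  · rintro (⟨t, ⟨ht, hp⟩, rfl⟩ | ⟨t, ⟨ht, hp⟩, rfl⟩)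
    · exact ⟨t, ht, by simp only [pvCand, hp, if_true]⟩
    · refine ⟨t, ht, ?_⟩
      obtain ⟨t1, t2⟩ := t
      simp only [Bool.and_eq_true, beq_iff_eq, bne_iff_ne] at hp
      simp [pvCand, hp.1, hp.2]
  · rintro ⟨t, ht, hc⟩
    obtain ⟨t1, t2⟩ := t
    simp only [pvCand] at hc
    split_ifs at hc with h1 h2
    · exact Or.inl ⟨(t1, t2), ⟨ht, h1⟩, Option.some_injective _ hc⟩
    · exact Or.inr ⟨(t1, t2), ⟨ht, h2⟩, Option.some_injective _ hc⟩

-- the per-blue step functions agree whenever the target collections have the same members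
theorem step_eq (tsA : PySem.Set (Int × Int)) (tsB : List (Int × Int))
    (hts : ∀ y, y ∈ tsA ↔ y ∈ tsB) (g : List (List Int)) (b : Int × Int) :
    pvStepA tsA g b = pvStepB tsB g b := by
  unfold pvStepA pvStepB
  cases hbest : pvBest tsB b.1 b.2 with
  | none =>
    obtain ⟨-, hall⟩ := (bestFold_none_iff b.1 b.2 tsB none).mp hbest
    have hnil : pvCandsA tsA b.1 b.2 = [] := by
      rcases he : pvCandsA tsA b.1 b.2 with _ | ⟨x, xs⟩
      · rfl
      · exfalso
        have hx : x ∈ pvCandsA tsA b.1 b.2 := by rw [he]; exact List.mem_cons_self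
        obtain ⟨t, ht, hct⟩ := (mem_candA tsA x).mp hx
        exact absurd hct (by simp [hall t ((hts t).mp ht)])
    rw [if_pos hnil]
  | some m =>
    obtain ⟨h1, -, h3⟩ := bestFold_some_spec b.1 b.2 tsB none m hbest
    rcases h1 with h1 | ⟨t, ht, hct⟩
    · exact absurd h1 (by simp)
    · have hmA : m ∈ pvCandsA tsA b.1 b.2 :=
        (mem_candA tsA m).mpr ⟨t, (hts t).mpr ht, hct⟩
      have hne : pvCandsA tsA b.1 b.2 ≠ [] := by
        intro hnil; rw [hnil] at hmA; exact absurd hmA (List.not_mem_nil)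
      rw [if_neg hne]
      obtain ⟨hmem, hmin⟩ := pvSortLex_headD_spec hne
      obtain ⟨u, hu, hcu⟩ := (mem_candA tsA _).mp hmem
      have h1 : pvLexLt ((pvSortLex (pvCandsA tsA b.1 b.2)).headD (0, 0, 0)) m = false :=
        h3 u ((hts u).mp hu) _ hcu
      have h2 : pvLexLt m ((pvSortLex (pvCandsA tsA b.1 b.2)).headD (0, 0, 0)) = false :=
        hmin m hmA
      rw [pvLexLt_antisymm h1 h2]

-- ===== VERDICT (by name: the statement is the Claim_ definition above) =====
theorem transform_spec : Claim_equal_transform := by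
  intro grid_lst _ _
  unfold Spec_transform transform transform_alt
  split
  · rfl
  · exact PySem.List.foldl_congr_mem _ _ _ _ (fun g b _ =>
      step_eq _ _ (targets_mem_equiv grid_lst _ _) g b)
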